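-- pv_equiv track=rewrite | github.com/jcaf28/imputaciones-powersap | backend/app/services/generar_imputaciones_sap/_d_asignar_fueras_sistema.py | get_vertex_priority_list
-- ===== SOURCE A (Python) =====
-- from string import ascii_uppercase
--
-- def get_vertex_rank(vertice: str) -> int:
--     """
--     Retorna la posición del vértice dentro de ascii_uppercase.
--     Si no existe o es más de un carácter, retorna 9999.
--     """
--     if len(vertice) != 1:
--         return 9999
--     try:
--         return ascii_uppercase.index(vertice.upper())
--     except ValueError:
--         return 9999
--
-- def get_vertex_priority_list(vertice_actual: str) -> list:
--     """
--     Genera una lista con: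
--       - el vértice actual
--       - vértices 'inferiores' (menor rank) en orden descendente
--       - vértices 'superiores' (mayor rank) en orden ascendente
--     """
--     r = get_vertex_rank(vertice_actual)
--     all_letters = list(ascii_uppercase)
--
--     inferiores = [v for v in all_letters if get_vertex_rank(v) < r]
--     superiores = [v for v in all_letters if get_vertex_rank(v) > r]
--
--     inf_desc = sorted(inferiores, key=lambda x: get_vertex_rank(x), reverse=True)
--     sup_asc = sorted(superiores, key=lambda x: get_vertex_rank(x))
--
--     return [vertice_actual] + inf_desc + sup_asc
-- ===== SOURCE B (Python) =====
-- from string import ascii_uppercase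
--
-- def get_vertex_rank(vertice: str) -> int:
--     if len(vertice) != 1:
--         return 9999
--     try:
--         return ascii_uppercase.index(vertice.upper())
--     except ValueError:
--         return 9999
--
-- def get_vertex_priority_list(vertice_actual: str) -> list:
--     r = get_vertex_rank(vertice_actual)
--     return [vertice_actual] + list(ascii_uppercase[:r])[::-1] + list(ascii_uppercase[r + 1:])
-- ===== Notes on version B (the rewrite author's own statement) =====
-- stated objective: simpler
-- what changed: Replaces the two rank-filter passes over the alphabet plus two key-sorts by computing the rank once and slicing ascii_uppercase directly: [v] + reversed(letters[:r]) + letters[r+1:].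
import Mathlib
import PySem

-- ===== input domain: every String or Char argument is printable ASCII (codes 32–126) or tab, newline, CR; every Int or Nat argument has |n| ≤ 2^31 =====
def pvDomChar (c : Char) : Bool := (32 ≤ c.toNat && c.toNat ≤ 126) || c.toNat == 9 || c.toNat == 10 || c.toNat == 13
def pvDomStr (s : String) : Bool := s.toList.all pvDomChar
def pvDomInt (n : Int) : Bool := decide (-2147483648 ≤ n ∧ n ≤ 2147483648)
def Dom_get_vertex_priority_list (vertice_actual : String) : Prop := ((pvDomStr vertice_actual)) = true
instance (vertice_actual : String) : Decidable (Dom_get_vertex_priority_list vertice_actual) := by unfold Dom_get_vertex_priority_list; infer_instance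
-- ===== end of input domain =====

-- B replaces A's two filter-then-sort passes over the alphabet by direct slicing around the
-- rank: result = [v] ++ reversed(letters[:r]) ++ letters[r+1:]  (objective: simpler).


-- ===== PORT A =====
-- shared module constant: string.ascii_uppercase
def pvAsciiUppercase : List Char := "ABCDEFGHIJKLMNOPQRSTUVWXYZ".toList

-- shared helper get_vertex_rank (identical in Source A and Source B).
-- ascii_uppercase.index(s) for the single-char string s is single-char substring search,
-- ported exactly as the index of that char in the 26-char list (ValueError ↦ none ↦ 9999).
def get_vertex_rank (vertice : String) : Int :=
  if PySem.Str.len vertice ≠ 1 then 9999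
  else
    match PySem.List.index? pvAsciiUppercase ((PySem.Str.upper vertice).toList.headI) with
    | some i => (i : Int)
    | none => 9999

-- list(ascii_uppercase): the 26 single-letter strings
def pvAllLetters : List String := pvAsciiUppercase.map (fun c => String.ofList [c])

def get_vertex_priority_list (vertice_actual : String) : List String :=
  let r := get_vertex_rank vertice_actual
  let all_letters := pvAllLetters
  let inferiores := all_letters.filter (fun v => decide (get_vertex_rank v < r))
  let superiores := all_letters.filter (fun v => decide (get_vertex_rank v > r))
  let inf_desc := PySem.List.sorted inferiores (fun x => get_vertex_rank x) true
  let sup_asc := PySem.List.sorted superiores (fun x => get_vertex_rank x) false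
  [vertice_actual] ++ inf_desc ++ sup_asc

-- ===== PORT B =====
def get_vertex_priority_list_alt (vertice_actual : String) : List String :=
  let r := get_vertex_rank vertice_actual
  [vertice_actual] ++ (PySem.List.slice pvAllLetters none (some r)).reverse
    ++ PySem.List.slice pvAllLetters (some (r + 1)) none

-- ===== PRECONDITION & SPEC =====
def Spec_get_vertex_priority_list (vertice_actual : String) (out : List String) : Prop := out = get_vertex_priority_list_alt vertice_actual
instance (vertice_actual : String) (out : List String) : Decidable (Spec_get_vertex_priority_list vertice_actual out) := by unfold Spec_get_vertex_priority_list; infer_instance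

-- ===== CLAIM (what is proved, stated in full; the proofs are below) =====
def Claim_equal_get_vertex_priority_list : Prop := ∀ (vertice_actual : String), Dom_get_vertex_priority_list vertice_actual → Spec_get_vertex_priority_list vertice_actual (get_vertex_priority_list vertice_actual)

-- ===== LEMMAS AND PROOFS =====

-- the tail of A's result as a function of the rank alone
def pvTailA (r : Int) : List String :=
  PySem.List.sorted (pvAllLetters.filter (fun v => decide (get_vertex_rank v < r)))
      (fun x => get_vertex_rank x) true
    ++ PySem.List.sorted (pvAllLetters.filter (fun v => decide (get_vertex_rank v > r)))
      (fun x => get_vertex_rank x) false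

-- the tail of B's result as a function of the rank alone
def pvTailB (r : Int) : List String :=
  (PySem.List.slice pvAllLetters none (some r)).reverse
    ++ PySem.List.slice pvAllLetters (some (r + 1)) none

theorem pvA_eq (v : String) :
    get_vertex_priority_list v = v :: pvTailA (get_vertex_rank v) := rfl

theorem pvB_eq (v : String) :
    get_vertex_priority_list_alt v = v :: pvTailB (get_vertex_rank v) := rfl

-- get_vertex_rank only ever returns 0..25 or 9999
theorem rank_cases (v : String) :
    get_vertex_rank v = 9999 ∨ (0 ≤ get_vertex_rank v ∧ get_vertex_rank v ≤ 25) := by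
  unfold get_vertex_rank
  split
  · exact Or.inl rfl
  · cases h : PySem.List.index? pvAsciiUppercase ((PySem.Str.upper v).toList.headI) with
    | none => exact Or.inl rfl
    | some i =>
        obtain ⟨hk, -, -⟩ := PySem.List.getElem_of_index?_eq_some h
        have : i < 26 := by simpa [pvAsciiUppercase] using hk
        refine Or.inr ?_
        show 0 ≤ (i : Int) ∧ (i : Int) ≤ 25
        omega

theorem tail_eq (r : Int) (h : r = 9999 ∨ (0 ≤ r ∧ r ≤ 25)) : pvTailA r = pvTailB r := by
  rcases h with h | ⟨h0, h1⟩
  · subst h; decide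
  · interval_cases r <;> decide

-- ===== VERDICT (by name: the statement is the Claim_ definition above) =====
theorem get_vertex_priority_list_spec : Claim_equal_get_vertex_priority_list := by
  intro v _
  unfold Spec_get_vertex_priority_list
  rw [pvA_eq, pvB_eq, tail_eq _ (rank_cases v)]
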